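-- pv_equiv track=rewrite | github.com/ederror/algorithm-study | Programmers/호텔 방 배정.py | solution
-- ===== SOURCE A (Python) =====
-- def solution(k, room_number):
--
--     def find(x):
--         if x not in emptyRoom:
--             return x
--         emptyRoom[x] = find(emptyRoom[x])
--         return emptyRoom[x]
--
--     answer = []
--     emptyRoom = dict()
--
--     for room in room_number:
--         allocated = find(room)
--         answer.append(allocated)
--         if allocated < k:
--             emptyRoom[allocated] = find(allocated+1)
--
--     return answer
-- ===== SOURCE B (Python) =====
-- def solution(k, room_number):
--     def find(x):
--         # iterative find: walk the chain collecting the path, then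
--         # point every visited key at the root (full path compression)
--         path = []
--         while x in emptyRoom:
--             path.append(x)
--             x = emptyRoom[x]
--         for key in path:
--             emptyRoom[key] = x
--         return x
--
--     answer = []
--     emptyRoom = {}
--     for room in room_number:
--         allocated = find(room)
--         answer.append(allocated)
--         if allocated < k:
--             emptyRoom[allocated] = find(allocated + 1)
--     return answer
-- ===== Notes on version B (the rewrite author's own statement) =====
-- stated objective: alternative
-- what changed: The recursive path-compressing find is replaced by an iterative two-phase find (walk the chain collecting the path, then rewrite every path key to the root), removing recursion entirely.
import Mathlib
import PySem

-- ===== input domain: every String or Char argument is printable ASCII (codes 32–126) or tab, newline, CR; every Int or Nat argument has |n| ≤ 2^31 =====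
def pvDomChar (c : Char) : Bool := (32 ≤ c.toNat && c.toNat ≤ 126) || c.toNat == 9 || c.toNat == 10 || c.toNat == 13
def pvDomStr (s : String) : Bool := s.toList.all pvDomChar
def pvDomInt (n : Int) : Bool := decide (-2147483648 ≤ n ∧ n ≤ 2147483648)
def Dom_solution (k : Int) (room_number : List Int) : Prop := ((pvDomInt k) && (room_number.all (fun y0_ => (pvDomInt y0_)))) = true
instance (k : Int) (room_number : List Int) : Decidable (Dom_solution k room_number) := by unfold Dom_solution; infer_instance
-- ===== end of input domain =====

-- B replaces A's recursive path-compressing find by an iterative two-phase find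
-- (collect the path, then rewrite every path key to the root); same outer loop.
-- Fuel (length + 2) is only a totality device: the dict's links strictly increase,
-- so every chain is shorter than the dict, which holds at most one key per room.

-- ===== PORT A =====
-- recursive find: `find(x)`; returns the root and the updated dict
def findA (fuel : Nat) (d : PySem.Dict Int Int) (x : Int) : Int × PySem.Dict Int Int :=
  match fuel with
  | 0 => (x, d)
  | f + 1 =>
    match d.get? x with
    | none => (x, d)                 -- if x not in emptyRoom: return x
    | some v =>                      -- emptyRoom[x] = find(emptyRoom[x]); return emptyRoom[x]
      let (r, d') := findA f d v
      (r, d'.insert x r)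

def stepA (k : Int) (fuel : Nat) (st : List Int × PySem.Dict Int Int) (room : Int) :
    List Int × PySem.Dict Int Int :=
  let (ans, d) := st
  let (allocated, d1) := findA fuel d room
  let ans' := ans ++ [allocated]
  if allocated < k then
    let (r, d2) := findA fuel d1 (allocated + 1)
    (ans', d2.insert allocated r)
  else (ans', d1)

def solution (k : Int) (room_number : List Int) : List Int :=
  let fuel := room_number.length + 2
  (room_number.foldl (stepA k fuel) ([], PySem.Dict.empty)).1

-- ===== PORT B =====
-- phase 1 of B's find: the while loop collecting the visited keys and the root
def walkB (fuel : Nat) (d : PySem.Dict Int Int) (x : Int) : List Int × Int :=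
  match fuel with
  | 0 => ([], x)
  | f + 1 =>
    match d.get? x with
    | none => ([], x)
    | some v =>
      let (p, r) := walkB f d v
      (x :: p, r)

-- B's find: walk, then `for key in path: emptyRoom[key] = root`
def findB (fuel : Nat) (d : PySem.Dict Int Int) (x : Int) : Int × PySem.Dict Int Int :=
  let (path, root) := walkB fuel d x
  (root, path.foldl (fun d key => d.insert key root) d)

def stepB (k : Int) (fuel : Nat) (st : List Int × PySem.Dict Int Int) (room : Int) :
    List Int × PySem.Dict Int Int :=
  let (ans, d) := st
  let (allocated, d1) := findB fuel d room
  let ans' := ans ++ [allocated]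
  if allocated < k then
    let (r, d2) := findB fuel d1 (allocated + 1)
    (ans', d2.insert allocated r)
  else (ans', d1)

def solution_alt (k : Int) (room_number : List Int) : List Int :=
  let fuel := room_number.length + 2
  (room_number.foldl (stepB k fuel) ([], PySem.Dict.empty)).1

-- ===== PRECONDITION & SPEC =====
def Spec_solution (k : Int) (room_number : List Int) (out : List Int) : Prop := out = solution_alt k room_number
instance (k : Int) (room_number : List Int) (out : List Int) : Decidable (Spec_solution k room_number out) := by unfold Spec_solution; infer_instance

-- ===== CLAIM (what is proved, stated in full; the proofs are below) =====
def Claim_equal_solution : Prop := ∀ (k : Int) (room_number : List Int), Dom_solution k room_number → Spec_solution k room_number (solution k room_number)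

-- ===== LEMMAS AND PROOFS =====

-- every key on the walk's path is present in the dict
theorem walkB_mem_contains (fuel : Nat) (d : PySem.Dict Int Int) (x j : Int)
    (hj : j ∈ (walkB fuel d x).1) : d.contains j = true := by
  induction fuel generalizing x with
  | zero => simp [walkB] at hj
  | succ f ih =>
    cases h : d.get? x with
    | none => simp [walkB, h] at hj
    | some v =>
      simp only [walkB, h] at hj
      rcases List.mem_cons.mp hj with rfl | hj'
      · rw [PySem.Dict.contains_eq_isSome_get?, h]; rfl
      · exact ih v hj'

-- overwrites (same value) of two keys both already present commute literally
theorem insert_insert_comm_of_contains (d : PySem.Dict Int Int) (a b r : Int)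
    (ha : d.contains a = true) (hb : d.contains b = true) :
    (d.insert a r).insert b r = (d.insert b r).insert a r := by
  apply PySem.Dict.ext
  have hab : (d.insert a r).contains b = true := by
    rw [PySem.Dict.contains_insert, hb]; simp
  have hba : (d.insert b r).contains a = true := by
    rw [PySem.Dict.contains_insert, ha]; simp
  rw [PySem.Dict.items_insert_of_contains _ r hab,
      PySem.Dict.items_insert_of_contains _ r hba,
      PySem.Dict.items_insert_of_contains _ r ha,
      PySem.Dict.items_insert_of_contains _ r hb,
      List.map_map, List.map_map]
  apply List.map_congr_left
  intro p _
  by_cases h1 : p.1 = a <;> by_cases h2 : p.1 = b <;>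
    simp [Function.comp, h1, h2] <;> subst_vars <;> simp_all

-- rewriting x before the rest of the path equals rewriting it last,
-- provided x and all path keys are already present
theorem foldl_insert_comm (p : List Int) (d : PySem.Dict Int Int) (x r : Int)
    (hx : d.contains x = true) (hp : ∀ j ∈ p, d.contains j = true) :
    p.foldl (fun d j => d.insert j r) (d.insert x r)
      = (p.foldl (fun d j => d.insert j r) d).insert x r := by
  induction p generalizing d with
  | nil => rfl
  | cons a p' ih =>
    simp only [List.foldl_cons]
    rw [insert_insert_comm_of_contains d x a r hx (hp a (List.mem_cons_self ..))]
    exact ih (d.insert a r)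
      (by rw [PySem.Dict.contains_insert, hx]; simp)
      (fun j hj => by rw [PySem.Dict.contains_insert, hp j (List.mem_cons_of_mem _ hj)]; simp)

-- the two finds agree (root and resulting dict)
theorem findA_eq_findB (fuel : Nat) (d : PySem.Dict Int Int) (x : Int) :
    findA fuel d x = findB fuel d x := by
  induction fuel generalizing x with
  | zero => rfl
  | succ f ih =>
    cases h : d.get? x with
    | none => simp [findA, findB, walkB, h]
    | some v =>
      have hx : d.contains x = true := by
        rw [PySem.Dict.contains_eq_isSome_get?, h]; rfl
      simp only [findA, findB, walkB, h, ih v, List.foldl_cons]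
      rw [foldl_insert_comm _ d x (walkB f d v).2 hx (walkB_mem_contains f d v)]

theorem stepA_eq_stepB (k : Int) (fuel : Nat) :
    stepA k fuel = stepB k fuel := by
  funext st room
  simp only [stepA, stepB, findA_eq_findB]

-- ===== VERDICT (by name: the statement is the Claim_ definition above) =====
theorem solution_spec : Claim_equal_solution := by
  intro k room_number _
  unfold Spec_solution solution solution_alt
  simp only [stepA_eq_stepB]
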